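-- pv_equiv track=rewrite | github.com/ladyblueumd/resume_database_system | app.py | categorize_section
-- ===== SOURCE A (Python) =====
-- def categorize_section(header: str, content: str) -> str:
--     """
--     Categorize a section based on its header and content
--     """
--     header_lower = header.lower()
--     content_lower = content.lower()
--     combined = f"{header_lower} {content_lower}"
--
--     # Professional summary indicators
--     if any(keyword in header_lower for keyword in ['summary', 'profile', 'objective', 'overview', 'about']):
--         return 'professional_summary'
--
--     # Technical skills indicators
--     if any(keyword in header_lower for keyword in ['technical', 'computer', 'software', 'programming', 'technology', 'platform', 'tool']):
--         return 'technical_skills'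
--
--     # Professional skills indicators
--     if any(keyword in header_lower for keyword in ['skill', 'competenc', 'abilit', 'strength', 'expertise']) and 'technical' not in header_lower:
--         return 'professional_skills'
--
--     # Work experience indicators
--     if any(keyword in header_lower for keyword in ['experience', 'employment', 'work', 'career', 'history']):
--         return 'work_experience'
--
--     # Company names and job titles are usually work experience
--     if any(indicator in header_lower for indicator in ['corp', 'inc', 'llc', 'company', 'technologies', 'systems']):
--         return 'work_experience'
--
--     if any(title in header_lower for title in ['president', 'manager', 'specialist', 'technician', 'engineer', 'analyst', 'director', 'coordinator', 'representative']):
--         return 'work_experience'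
--
--     # Education indicators
--     if any(keyword in header_lower for keyword in ['education', 'academic', 'degree', 'university', 'college', 'school']):
--         return 'education'
--
--     # Certification indicators
--     if any(keyword in header_lower for keyword in ['certification', 'certificate', 'license', 'credential', 'accreditation']):
--         return 'certifications'
--
--     # Project indicators
--     if any(keyword in header_lower for keyword in ['project', 'portfolio', 'achievement', 'accomplishment']):
--         return 'projects'
--
--     # Contact info indicators
--     if any(keyword in header_lower for keyword in ['contact', 'phone', 'email', 'address', 'linkedin']):
--         return 'contact_info'
--
--     # Content-based categorization for unclear headers
--     if any(keyword in content_lower for keyword in ['managed', 'developed', 'implemented', 'led', 'coordinated', 'supervised', 'responsible for']):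
--         return 'work_experience'
--
--     if any(keyword in content_lower for keyword in ['bachelor', 'master', 'phd', 'degree', 'graduated', 'gpa']):
--         return 'education'
--
--     if any(keyword in content_lower for keyword in ['certified', 'licensed', 'comptia', 'microsoft certified', 'cisco']):
--         return 'certifications'
--
--     # If we can't categorize it, put it in other_sections
--     return 'other_sections'
-- ===== SOURCE B (Python) =====
-- # Different algorithm: instead of a first-match cascade of if-statements, flatten all
-- # rules into one keyword table, collect the priorities of ALL matching keywords in a
-- # single comprehension, and aggregate with min(); a dict maps the winning priority to
-- # its category.  A's "'technical' not in header" exclusion on the professional_skills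
-- # rule is dropped because it is redundant: 'technical' is itself a keyword of the
-- # higher-priority technical_skills rule, so any header containing it already wins there.
-- _GROUPS = [
--     ('h', 'professional_summary', ['summary', 'profile', 'objective', 'overview', 'about']),
--     ('h', 'technical_skills', ['technical', 'computer', 'software', 'programming', 'technology', 'platform', 'tool']),
--     ('h', 'professional_skills', ['skill', 'competenc', 'abilit', 'strength', 'expertise']),
--     ('h', 'work_experience', ['experience', 'employment', 'work', 'career', 'history']),
--     ('h', 'work_experience', ['corp', 'inc', 'llc', 'company', 'technologies', 'systems']),
--     ('h', 'work_experience', ['president', 'manager', 'specialist', 'technician', 'engineer', 'analyst', 'director', 'coordinator', 'representative']),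
--     ('h', 'education', ['education', 'academic', 'degree', 'university', 'college', 'school']),
--     ('h', 'certifications', ['certification', 'certificate', 'license', 'credential', 'accreditation']),
--     ('h', 'projects', ['project', 'portfolio', 'achievement', 'accomplishment']),
--     ('h', 'contact_info', ['contact', 'phone', 'email', 'address', 'linkedin']),
--     ('c', 'work_experience', ['managed', 'developed', 'implemented', 'led', 'coordinated', 'supervised', 'responsible for']),
--     ('c', 'education', ['bachelor', 'master', 'phd', 'degree', 'graduated', 'gpa']),
--     ('c', 'certifications', ['certified', 'licensed', 'comptia', 'microsoft certified', 'cisco']),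
-- ]
-- _CATEGORY = {i + 1: cat for i, (_src, cat, _kws) in enumerate(_GROUPS)}
--
--
-- def categorize_section(header: str, content: str) -> str:
--     hl = header.lower()
--     cl = content.lower()
--     matched = [i + 1
--                for i, (src, _cat, kws) in enumerate(_GROUPS)
--                for kw in kws
--                if kw in (hl if src == 'h' else cl)]
--     return _CATEGORY.get(min(matched, default=0), 'other_sections')
-- ===== Notes on version B (the rewrite author's own statement) =====
-- stated objective: alternative
-- what changed: Replaces A's first-match cascade of thirteen if-statements by a flattened keyword table: one comprehension collects the priorities of ALL matching keywords, min() aggregates them and a dict maps the winning priority to its category; the redundant 'technical'-exclusion disappears (the 'technical' keyword already wins at the higher-priority technical_skills rule).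
import Mathlib
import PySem

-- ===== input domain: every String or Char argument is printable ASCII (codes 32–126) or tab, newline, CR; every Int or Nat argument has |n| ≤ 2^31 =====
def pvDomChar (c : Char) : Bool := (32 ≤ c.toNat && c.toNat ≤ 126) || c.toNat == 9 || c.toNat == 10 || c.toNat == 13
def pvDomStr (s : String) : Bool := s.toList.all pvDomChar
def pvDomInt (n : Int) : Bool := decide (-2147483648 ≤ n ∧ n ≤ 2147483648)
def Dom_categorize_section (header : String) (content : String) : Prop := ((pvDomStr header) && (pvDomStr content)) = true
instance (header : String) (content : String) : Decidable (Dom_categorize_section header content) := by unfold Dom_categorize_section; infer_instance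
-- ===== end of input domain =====

-- B replaces A's first-match cascade by a flattened keyword table: one comprehension
-- collects the priorities of all matching keywords, min() aggregates, a dict maps the
-- winner to its category (objective: alternative); equivalence is proved for all inputs.

-- ===== PORT A =====
def categorize_section (header : String) (content : String) : String :=
  let header_lower := PySem.Str.lower header
  let content_lower := PySem.Str.lower content
  let _combined := header_lower ++ " " ++ content_lower
  if ["summary", "profile", "objective", "overview", "about"].any
      (fun k => PySem.Str.isIn k header_lower) then "professional_summary"
  else if ["technical", "computer", "software", "programming", "technology", "platform", "tool"].any
      (fun k => PySem.Str.isIn k header_lower) then "technical_skills"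
  else if (["skill", "competenc", "abilit", "strength", "expertise"].any
      (fun k => PySem.Str.isIn k header_lower)) && !(PySem.Str.isIn "technical" header_lower) then "professional_skills"
  else if ["experience", "employment", "work", "career", "history"].any
      (fun k => PySem.Str.isIn k header_lower) then "work_experience"
  else if ["corp", "inc", "llc", "company", "technologies", "systems"].any
      (fun k => PySem.Str.isIn k header_lower) then "work_experience"
  else if ["president", "manager", "specialist", "technician", "engineer", "analyst", "director", "coordinator", "representative"].any
      (fun k => PySem.Str.isIn k header_lower) then "work_experience"
  else if ["education", "academic", "degree", "university", "college", "school"].any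
      (fun k => PySem.Str.isIn k header_lower) then "education"
  else if ["certification", "certificate", "license", "credential", "accreditation"].any
      (fun k => PySem.Str.isIn k header_lower) then "certifications"
  else if ["project", "portfolio", "achievement", "accomplishment"].any
      (fun k => PySem.Str.isIn k header_lower) then "projects"
  else if ["contact", "phone", "email", "address", "linkedin"].any
      (fun k => PySem.Str.isIn k header_lower) then "contact_info"
  else if ["managed", "developed", "implemented", "led", "coordinated", "supervised", "responsible for"].any
      (fun k => PySem.Str.isIn k content_lower) then "work_experience"
  else if ["bachelor", "master", "phd", "degree", "graduated", "gpa"].any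
      (fun k => PySem.Str.isIn k content_lower) then "education"
  else if ["certified", "licensed", "comptia", "microsoft certified", "cisco"].any
      (fun k => PySem.Str.isIn k content_lower) then "certifications"
  else "other_sections"

-- ===== PORT B =====
-- Source B's _GROUPS table: (source, category, keywords)
def csGroups : List (String × String × List String) :=
  [ ("h", "professional_summary", ["summary", "profile", "objective", "overview", "about"]),
    ("h", "technical_skills", ["technical", "computer", "software", "programming", "technology", "platform", "tool"]),
    ("h", "professional_skills", ["skill", "competenc", "abilit", "strength", "expertise"]),
    ("h", "work_experience", ["experience", "employment", "work", "career", "history"]),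
    ("h", "work_experience", ["corp", "inc", "llc", "company", "technologies", "systems"]),
    ("h", "work_experience", ["president", "manager", "specialist", "technician", "engineer", "analyst", "director", "coordinator", "representative"]),
    ("h", "education", ["education", "academic", "degree", "university", "college", "school"]),
    ("h", "certifications", ["certification", "certificate", "license", "credential", "accreditation"]),
    ("h", "projects", ["project", "portfolio", "achievement", "accomplishment"]),
    ("h", "contact_info", ["contact", "phone", "email", "address", "linkedin"]),
    ("c", "work_experience", ["managed", "developed", "implemented", "led", "coordinated", "supervised", "responsible for"]),
    ("c", "education", ["bachelor", "master", "phd", "degree", "graduated", "gpa"]),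
    ("c", "certifications", ["certified", "licensed", "comptia", "microsoft certified", "cisco"]) ]

-- Source B's _CATEGORY dict: priority -> category
def csCategory : PySem.Dict Int String :=
  PySem.Dict.ofList ((PySem.List.enumerate csGroups).map (fun p => (p.1 + 1, p.2.2.1)))

def categorize_section_alt (header : String) (content : String) : String :=
  let hl := PySem.Str.lower header
  let cl := PySem.Str.lower content
  -- the comprehension: priorities of ALL matching keywords, in table order
  let matched := (PySem.List.enumerate csGroups).flatMap (fun p =>
    (p.2.2.2.filter (fun kw => PySem.Str.isIn kw (if p.2.1 == "h" then hl else cl))).map (fun _ => p.1 + 1))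
  PySem.Dict.getD csCategory (PySem.List.minD matched (fun x => x) 0) "other_sections"

-- ===== PRECONDITION & SPEC =====
def Spec_categorize_section (header : String) (content : String) (out : String) : Prop := out = categorize_section_alt header content
instance (header : String) (content : String) (out : String) : Decidable (Spec_categorize_section header content out) := by unfold Spec_categorize_section; infer_instance

-- ===== CLAIM (what is proved, stated in full; the proofs are below) =====
def Claim_equal_categorize_section : Prop := ∀ (header : String) (content : String), Dom_categorize_section header content → Spec_categorize_section header content (categorize_section header content)

-- ===== LEMMAS AND PROOFS =====

-- first-match cascade over the group table (proof-side characterisation of B)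
def csFirst (hl cl : String) : List (String × String × List String) → Int → Int
  | [], _ => 0
  | (src, _, kws) :: rest, i =>
      if kws.any (fun kw => PySem.Str.isIn kw (if src == "h" then hl else cl)) then i + 1
      else csFirst hl cl rest (i + 1)

theorem minD_eq_of_min {xs : List Int} {a : Int} (h1 : a ∈ xs) (h2 : ∀ y ∈ xs, a ≤ y) :
    PySem.List.minD xs (fun x => x) 0 = a := by
  cases hm : PySem.List.min? xs (fun x => x) with
  | none => rw [PySem.List.min?_eq_none_iff] at hm; subst hm; cases h1
  | some m =>
    have hmem := PySem.List.min?_mem hm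
    have hmin := PySem.List.min?_isMin hm
    have hma : m = a := le_antisymm (hmin a h1) (h2 m hmem)
    simp [PySem.List.minD, hm, hma]

theorem csCascade (t : String) (p : Int) (kws : List String) (rest : List Int)
    (hrest : ∀ y ∈ rest, p ≤ y) :
    PySem.List.minD ((kws.filter (fun kw => PySem.Str.isIn kw t)).map (fun _ => p) ++ rest)
        (fun x => x) 0 =
      if kws.any (fun kw => PySem.Str.isIn kw t) then p
      else PySem.List.minD rest (fun x => x) 0 := by
  by_cases hany : kws.any (fun kw => PySem.Str.isIn kw t) = true
  · rw [if_pos hany]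
    apply minD_eq_of_min
    · rcases List.any_eq_true.mp hany with ⟨kw, hkw, hin⟩
      exact List.mem_append_left _ (List.mem_map.mpr ⟨kw, List.mem_filter.mpr ⟨hkw, hin⟩, rfl⟩)
    · intro y hy
      rcases List.mem_append.mp hy with h | h
      · rcases List.mem_map.mp h with ⟨_, _, rfl⟩; exact le_refl _
      · exact hrest y h
  · rw [if_neg hany]
    have hnil : kws.filter (fun kw => PySem.Str.isIn kw t) = [] := by
      rw [List.filter_eq_nil_iff]
      intro kw hkw hin
      exact hany (List.any_eq_true.mpr ⟨kw, hkw, hin⟩)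
    rw [hnil]
    rfl

theorem ge_flat (hl cl : String) (gs : List (String × String × List String)) :
    ∀ (j : Int) (y : Int), y ∈ (PySem.List.enumerate gs j).flatMap (fun p =>
      (p.2.2.2.filter (fun kw => PySem.Str.isIn kw (if p.2.1 == "h" then hl else cl))).map
        (fun _ => p.1 + 1)) → j + 1 ≤ y := by
  induction gs with
  | nil => intro j y hy; simp [PySem.List.enumerate_nil] at hy
  | cons g rest ih =>
    intro j y hy
    rw [PySem.List.enumerate_cons, List.flatMap_cons] at hy
    rcases List.mem_append.mp hy with h | h
    · rcases List.mem_map.mp h with ⟨_, _, rfl⟩; exact le_refl _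
    · have := ih (j + 1) y h; omega

theorem minD_flat (hl cl : String) (gs : List (String × String × List String)) :
    ∀ i : Int, PySem.List.minD ((PySem.List.enumerate gs i).flatMap (fun p =>
        (p.2.2.2.filter (fun kw => PySem.Str.isIn kw (if p.2.1 == "h" then hl else cl))).map
          (fun _ => p.1 + 1))) (fun x => x) 0 = csFirst hl cl gs i := by
  induction gs with
  | nil => intro i; rfl
  | cons g rest ih =>
    intro i
    obtain ⟨src, cat, kws⟩ := g
    rw [PySem.List.enumerate_cons, List.flatMap_cons]
    have hrest : ∀ y ∈ (PySem.List.enumerate rest (i + 1)).flatMap (fun p =>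
        (p.2.2.2.filter (fun kw => PySem.Str.isIn kw (if p.2.1 == "h" then hl else cl))).map
          (fun _ => p.1 + 1)), i + 1 ≤ y := by
      intro y hy; have := ge_flat hl cl rest (i + 1) y hy; omega
    have := csCascade (if src == "h" then hl else cl) (i + 1) kws _ hrest
    simp only [csFirst]
    rw [← ih (i + 1)]
    exact this

theorem alt_eq (header content : String) :
    categorize_section_alt header content =
      PySem.Dict.getD csCategory
        (csFirst (PySem.Str.lower header) (PySem.Str.lower content) csGroups 0) "other_sections" := by
  have h := minD_flat (PySem.Str.lower header) (PySem.Str.lower content) csGroups 0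
  calc categorize_section_alt header content
      = PySem.Dict.getD csCategory
          (PySem.List.minD ((PySem.List.enumerate csGroups 0).flatMap (fun p =>
            (p.2.2.2.filter (fun kw => PySem.Str.isIn kw
              (if p.2.1 == "h" then PySem.Str.lower header else PySem.Str.lower content))).map
              (fun _ => p.1 + 1))) (fun x => x) 0) "other_sections" := rfl
    _ = _ := by rw [h]

-- ===== VERDICT (by name: the statement is the Claim_ definition above) =====
set_option maxHeartbeats 2000000 in
theorem categorize_section_spec : Claim_equal_categorize_section := by
  intro header content _
  unfold Spec_categorize_section
  rw [alt_eq]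
  unfold categorize_section
  simp only [csFirst, csGroups, String.reduceBEq, beq_self_eq_true, if_true, Bool.false_eq_true, if_false, Int.reduceAdd]
  simp only [apply_ite (fun m : Int => PySem.Dict.getD csCategory m "other_sections")]
  have e0 : PySem.Dict.getD csCategory 0 "other_sections" = "other_sections" := by decide
  have e1 : PySem.Dict.getD csCategory 1 "other_sections" = "professional_summary" := by decide
  have e2 : PySem.Dict.getD csCategory 2 "other_sections" = "technical_skills" := by decide
  have e3 : PySem.Dict.getD csCategory 3 "other_sections" = "professional_skills" := by decide
  have e4 : PySem.Dict.getD csCategory 4 "other_sections" = "work_experience" := by decide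
  have e5 : PySem.Dict.getD csCategory 5 "other_sections" = "work_experience" := by decide
  have e6 : PySem.Dict.getD csCategory 6 "other_sections" = "work_experience" := by decide
  have e7 : PySem.Dict.getD csCategory 7 "other_sections" = "education" := by decide
  have e8 : PySem.Dict.getD csCategory 8 "other_sections" = "certifications" := by decide
  have e9 : PySem.Dict.getD csCategory 9 "other_sections" = "projects" := by decide
  have e10 : PySem.Dict.getD csCategory 10 "other_sections" = "contact_info" := by decide
  have e11 : PySem.Dict.getD csCategory 11 "other_sections" = "work_experience" := by decide
  have e12 : PySem.Dict.getD csCategory 12 "other_sections" = "education" := by decide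
  have e13 : PySem.Dict.getD csCategory 13 "other_sections" = "certifications" := by decide
  rw [e1, e2, e3, e4, e5, e6, e7, e8, e9, e10, e11, e12, e13, e0]
  by_cases h1 : (["summary", "profile", "objective", "overview", "about"].any fun k => PySem.Str.isIn k (PySem.Str.lower header)) = true
  · rw [if_pos h1, if_pos h1]
  · rw [if_neg h1, if_neg h1]
    by_cases h2 : (["technical", "computer", "software", "programming", "technology", "platform", "tool"].any fun k => PySem.Str.isIn k (PySem.Str.lower header)) = true
    · rw [if_pos h2, if_pos h2]
    · rw [if_neg h2, if_neg h2]
      have htech : PySem.Str.isIn "technical" (PySem.Str.lower header) = false := by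
        rcases Bool.eq_false_or_eq_true (PySem.Str.isIn "technical" (PySem.Str.lower header)) with hx | hx
        · exact absurd (List.any_eq_true.mpr ⟨"technical", by simp, hx⟩) h2
        · exact hx
      rw [htech]
      simp only [Bool.not_false, Bool.and_true]
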